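-- pv_equiv track=rewrite | github.com/tmxkqotnl/study_this_is_coding_test_to_get_a_job | exam/greedy/prev_1.py | solution
-- ===== SOURCE A (Python) =====
-- def solution(n: int, lst: list[int]):
--     lst = sorted(lst, reverse=True)
--
--     ans = 0
--     for i in lst:
--         if n < i:
--             return ans
--         n -= i
--         ans += 1
-- ===== SOURCE B (Python) =====
-- def solution(n, lst):
--     # Selection-based recursion: no sorting at all. Repeatedly pick the current
--     # maximum; stop as soon as it no longer fits the remaining budget.
--     def go(budget, items, ans):
--         if not items:
--             return ans
--         m = max(items)
--         if budget < m:
--             return ans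
--         rest = items.copy()
--         rest.remove(m)
--         return go(budget - m, rest, ans + 1)
--     return go(n, list(lst), 0)
-- ===== Notes on version B (the rewrite author's own statement) =====
-- stated objective: alternative
-- what changed: B never sorts: it is a selection-based recursion that repeatedly extracts the current maximum of the remaining multiset (max + remove) and stops when that maximum exceeds the remaining budget, whereas A sorts descending once and scans with an early return.
-- outside the precondition, e.g. on solution(10, [1, 2]): A returns None, B returns 2
import Mathlib
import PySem

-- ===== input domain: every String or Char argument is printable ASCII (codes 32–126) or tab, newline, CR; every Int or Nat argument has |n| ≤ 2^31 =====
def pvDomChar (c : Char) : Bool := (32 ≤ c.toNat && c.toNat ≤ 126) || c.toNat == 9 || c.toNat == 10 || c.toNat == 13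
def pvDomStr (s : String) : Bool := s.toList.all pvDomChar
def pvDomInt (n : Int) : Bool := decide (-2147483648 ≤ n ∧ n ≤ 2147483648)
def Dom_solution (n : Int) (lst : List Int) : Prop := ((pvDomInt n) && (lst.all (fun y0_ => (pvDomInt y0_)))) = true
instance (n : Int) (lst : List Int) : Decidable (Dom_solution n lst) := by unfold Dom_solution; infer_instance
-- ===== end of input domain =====

-- B replaces A's sort-then-scan with a selection-based recursion (repeated max extraction, no sort); alternative algorithm, not faster.


-- ===== PORT A =====
-- A's for-loop over the descending-sorted list, with early return; the [] case
-- is where Python A falls off the loop and returns None (excluded by Pre_solution).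
def solutionGo (n ans : Int) : List Int → Int
  | [] => ans
  | i :: rest => if n < i then ans else solutionGo (n - i) (ans + 1) rest

def solution (n : Int) (lst : List Int) : Int :=
  solutionGo n 0 (PySem.List.sorted lst (fun x => x) true)

-- ===== PORT B =====
-- Source B's recursive go: if items empty return ans; m = max(items); if budget < m
-- return ans; else remove (first occurrence of) m and recurse.
def solutionAltGo (budget : Int) (items : List Int) (ans : Int) : Int :=
  match items with
  | [] => ans
  | x :: rest0 =>
    let m := List.foldl max x rest0          -- max(items)  (= PySem.List.max?, see max?_id_cons)
    if budget < m then ans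
    else
      match h : PySem.List.remove? (x :: rest0) m with
      | none => ans                           -- unreachable: m = max(items) ∈ items, list.remove cannot raise
      | some rest =>
        solutionAltGo (budget - m) rest (ans + 1)
termination_by items.length
decreasing_by
  have hmem : m ∈ x :: rest0 := by
    by_contra hnm
    rw [(PySem.List.remove?_eq_none_iff _ _).mpr hnm] at h
    simp at h
  obtain rfl : rest = (x :: rest0).erase m := by
    rw [PySem.List.remove?_eq_some_erase _ m hmem] at h
    exact (Option.some.inj h).symm
  have h1 := List.length_erase_of_mem hmem
  rw [h1, List.length_cons]
  omega

def solution_alt (n : Int) (lst : List Int) : Int :=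
  solutionAltGo n lst 0

-- ===== PRECONDITION & SPEC =====
-- Pre_ excludes exactly the inputs on which A's loop exhausts the list (every
-- prefix sum of the descending-sorted list is ≤ n): there Python A falls off
-- the loop and returns None, which is not an int.
def Pre_solution (n : Int) (lst : List Int) : Prop :=
  ∃ k < lst.length, n < ((PySem.List.sorted lst (fun x => x) true).take (k + 1)).sum
instance (n : Int) (lst : List Int) : Decidable (Pre_solution n lst) := by unfold Pre_solution; infer_instance

def pvWitness_solution : Int × List Int := (5, [3, 4, 1])

def Spec_solution (n : Int) (lst : List Int) (out : Int) : Prop := out = solution_alt n lst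
instance (n : Int) (lst : List Int) (out : Int) : Decidable (Spec_solution n lst out) := by unfold Spec_solution; infer_instance

-- ===== CLAIM (what is proved, stated in full; the proofs are below) =====
def Claim_equal_solution : Prop := ∀ (n : Int) (lst : List Int), Dom_solution n lst → Pre_solution n lst → Spec_solution n lst (solution n lst)

-- ===== LEMMAS AND PROOFS =====
-- Correspondence: scanning ANY descending-ordered rearrangement l of xs with A's
-- loop equals B's repeated max extraction from xs — at each step the head of l
-- is a maximal element of xs (both ≥ each other, hence equal as Int values),
-- and removing it keeps the invariant.
theorem go_eq_altGo (l : List Int) : ∀ (xs : List Int) (n ans : Int),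
    l.Perm xs → l.Pairwise (fun a b => b ≤ a) →
    solutionGo n ans l = solutionAltGo n xs ans := by
  induction l with
  | nil =>
    intro xs n ans hp _
    obtain rfl : xs = [] := hp.symm.eq_nil
    rw [solutionAltGo.eq_def]
    rfl
  | cons m t ih =>
    intro xs n ans hp hpw
    obtain ⟨x, rest0, rfl⟩ : ∃ x rest0, xs = x :: rest0 := by
      cases xs with
      | nil => exact absurd hp.eq_nil (by simp)
      | cons a b => exact ⟨a, b, rfl⟩
    -- the head m of the ordered list is THE max value of xs
    have hmemm : m ∈ x :: rest0 := hp.mem_iff.mp (by simp)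
    have hmax : ∀ y ∈ x :: rest0, y ≤ m := by
      intro y hy
      rcases List.mem_cons.mp (hp.mem_iff.mpr hy) with h | h
      · omega
      · exact List.rel_of_pairwise_cons hpw h
    have hM : List.foldl max x rest0 = m := by
      have hmx := PySem.List.max?_id_cons (κ := Int) x rest0
      have h1 : List.foldl max x rest0 ≤ m := hmax _ (PySem.List.max?_mem hmx)
      have h2 : m ≤ List.foldl max x rest0 := PySem.List.max?_isMax hmx m hmemm
      omega
    rw [solutionAltGo.eq_def]
    simp only [hM, solutionGo]
    by_cases hb : n < m
    · rw [if_pos hb, if_pos hb]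
    · rw [if_neg hb, if_neg hb]
      split
      · rename_i h
        rw [hM] at h
        exact absurd hmemm ((PySem.List.remove?_eq_none_iff _ _).mp h)
      · rename_i rest h
        rw [hM] at h
        obtain rfl : rest = (x :: rest0).erase m := by
          rw [PySem.List.remove?_eq_some_erase _ m hmemm] at h
          exact (Option.some.inj h).symm
        have hperm : t.Perm ((x :: rest0).erase m) :=
          (List.perm_cons m).mp (hp.trans (List.perm_cons_erase hmemm))
        exact ih _ _ _ hperm hpw.of_cons

-- ===== VERDICT (by name: the statement is the Claim_ definition above) =====
theorem solution_spec : Claim_equal_solution := by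
  intro n lst _ _
  unfold Spec_solution solution solution_alt
  exact go_eq_altGo _ lst n 0 (PySem.List.sorted_perm lst _ _) (PySem.List.sorted_pairwise_rev lst _)
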